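-- pv_equiv track=rewrite | github.com/pooya-mohammadi/NER-Transformers-ArmanPers | split_dataset.py | get_samples
-- ===== SOURCE A (Python) =====
-- def get_samples(lines: list[str]) -> list:
--     """
--     input is a list of name and tag
--     :param lines:
--     :return:
--     """
--     samples = []
--     sample = []
--     for line in lines:
--         line = line.strip()
--         if line:
--             sample.append(line)
--         else:
--             samples.append(sample)
--             sample = []
--
--     return samples
-- ===== SOURCE B (Python) =====
-- def get_samples(lines: list[str]) -> list:
--     stripped = [line.strip() for line in lines]
--     boundaries = [i for i, l in enumerate(stripped) if not l]
--     samples = []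
--     start = 0
--     for b in boundaries:
--         samples.append(stripped[start:b])
--         start = b + 1
--     return samples
-- ===== Notes on version B (the rewrite author's own statement) =====
-- stated objective: alternative
-- what changed: Instead of one stateful pass that grows a current sample and flushes it on blanks, B strips all lines up front, collects the indices of blank entries, and slices the stripped list between consecutive boundaries with a moving start cursor.
import Mathlib
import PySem

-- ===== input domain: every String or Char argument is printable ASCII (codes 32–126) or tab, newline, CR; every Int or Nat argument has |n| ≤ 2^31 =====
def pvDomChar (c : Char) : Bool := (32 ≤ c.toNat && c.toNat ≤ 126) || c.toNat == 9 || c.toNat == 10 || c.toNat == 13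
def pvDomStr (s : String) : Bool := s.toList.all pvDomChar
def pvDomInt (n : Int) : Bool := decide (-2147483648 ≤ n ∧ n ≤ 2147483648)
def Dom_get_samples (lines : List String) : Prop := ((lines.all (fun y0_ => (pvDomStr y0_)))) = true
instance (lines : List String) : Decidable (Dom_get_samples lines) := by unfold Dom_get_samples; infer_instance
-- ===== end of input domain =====

-- B replaces A's stateful accumulate-and-flush pass by strip-all, collect blank indices, slice between boundaries; same cost, different decomposition.

-- ===== PORT A =====
def get_samples (lines : List String) : List (List String) :=
  (lines.foldl
    (fun (st : List (List String) × List String) line =>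
      let line := PySem.Str.strip line
      if line ≠ "" then (st.1, st.2 ++ [line]) else (st.1 ++ [st.2], []))
    ([], [])).1

-- ===== PORT B =====
def get_samples_alt (lines : List String) : List (List String) :=
  let stripped := lines.map (fun line => PySem.Str.strip line)
  let boundaries := (PySem.List.enumerate stripped 0).filterMap
      (fun p => if p.2 = "" then some p.1 else none)
  (boundaries.foldl
    (fun (st : List (List String) × Int) b =>
      (st.1 ++ [PySem.List.slice stripped (some st.2) (some b)], b + 1))
    ([], 0)).1

-- ===== PRECONDITION & SPEC =====
def Spec_get_samples (lines : List String) (out : List (List String)) : Prop := out = get_samples_alt lines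
instance (lines : List String) (out : List (List String)) : Decidable (Spec_get_samples lines out) := by unfold Spec_get_samples; infer_instance

-- ===== CLAIM (what is proved, stated in full; the proofs are below) =====
def Claim_equal_get_samples : Prop := ∀ (lines : List String), Dom_get_samples lines → Spec_get_samples lines (get_samples lines)

-- ===== LEMMAS AND PROOFS =====

/-- Reference recursion: split a (pre-stripped) list on blank entries, dropping the trailing region. -/
def splitRec (cur : List String) : List String → List (List String)
  | [] => []
  | x :: t => if x ≠ "" then splitRec (cur ++ [x]) t else cur :: splitRec [] t

/-- A's fold over the raw lines computes `splitRec` of the stripped lines. -/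
theorem foldA_eq_splitRec (lines : List String) (acc : List (List String)) (cur : List String) :
    (lines.foldl
      (fun (st : List (List String) × List String) line =>
        let line := PySem.Str.strip line
        if line ≠ "" then (st.1, st.2 ++ [line]) else (st.1 ++ [st.2], []))
      (acc, cur)).1 = acc ++ splitRec cur (lines.map (fun line => PySem.Str.strip line)) := by
  induction lines generalizing acc cur with
  | nil => simp [splitRec]
  | cons x t ih =>
    simp only [List.foldl_cons, List.map_cons]
    by_cases hx : PySem.Str.strip x = ""
    · rw [if_neg (by simp [hx]), ih]
      simp [splitRec, hx]
    · rw [if_pos hx, ih]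
      simp [splitRec, hx]

theorem take_succ_of_drop {α : Type} (l : List α) (n : Nat) (x : α) (t : List α)
    (h : l.drop n = x :: t) : l.take (n + 1) = l.take n ++ [x] := by
  induction n generalizing l with
  | zero => cases l <;> simp_all
  | succ n ih =>
    cases l with
    | nil => simp at h
    | cons y l =>
      simp only [List.drop_succ_cons] at h
      simp [ih l h]

/-- B's boundary fold, generalized: `j` is the start cursor, `k` the index of the head of `s`
    inside the full stripped list `L`. -/
theorem foldB_eq_splitRec (L : List String) (s : List String) (j k : Nat) (acc : List (List String))
    (hjk : j ≤ k) (hdrop : L.drop k = s) :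
    (((PySem.List.enumerate s (k : Int)).filterMap
        (fun p => if p.2 = "" then some p.1 else none)).foldl
      (fun (st : List (List String) × Int) b =>
        (st.1 ++ [PySem.List.slice L (some st.2) (some b)], b + 1))
      (acc, (j : Int))).1 = acc ++ splitRec ((L.drop j).take (k - j)) s := by
  induction s generalizing j k acc with
  | nil =>
    have hnil : PySem.List.enumerate ([] : List String) (k : Int) = [] :=
      List.eq_nil_of_length_eq_zero (by simp)
    rw [hnil]
    simp only [List.filterMap_nil, List.foldl_nil, splitRec, List.append_nil]
  | cons x t ih =>
    have hdrop' : L.drop (k + 1) = t := by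
      rw [← List.tail_drop, hdrop]
      rfl
    rw [PySem.List.enumerate_cons,
      show ((k : Int) + 1) = ((k + 1 : Nat) : Int) by push_cast; ring]
    by_cases hx : x = ""
    · -- boundary at index k: flush the slice [j, k) and move the cursor to k + 1
      rw [List.filterMap_cons_some (by simp [hx] : _ = some (k : Int)), List.foldl_cons]
      dsimp only
      rw [show ((k : Int) + 1) = ((k + 1 : Nat) : Int) by push_cast; ring]
      rw [ih (k + 1) (k + 1) _ (Nat.le_refl _) hdrop']
      rw [PySem.List.slice_natCast]
      simp [splitRec, hx]
    · -- non-blank entry: it joins the current region, the cursor stays at j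
      rw [List.filterMap_cons_none (by simp [hx])]
      rw [ih j (k + 1) acc (Nat.le_succ_of_le hjk) hdrop']
      have hd : (L.drop j).drop (k - j) = x :: t := by
        rw [List.drop_drop, show j + (k - j) = k by omega]
        exact hdrop
      have ht : (L.drop j).take (k + 1 - j) = (L.drop j).take (k - j) ++ [x] := by
        rw [show k + 1 - j = (k - j) + 1 by omega]
        exact take_succ_of_drop _ _ _ _ hd
      simp [splitRec, hx, ht]

theorem getA_char (lines : List String) :
    get_samples lines = splitRec [] (lines.map (fun line => PySem.Str.strip line)) := by
  unfold get_samples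
  rw [foldA_eq_splitRec]
  simp

theorem getB_char (lines : List String) :
    get_samples_alt lines = splitRec [] (lines.map (fun line => PySem.Str.strip line)) := by
  unfold get_samples_alt
  have h := foldB_eq_splitRec (lines.map (fun line => PySem.Str.strip line))
    (lines.map (fun line => PySem.Str.strip line)) 0 0 [] (Nat.le_refl 0) (by simp)
  simpa using h

-- ===== VERDICT (by name: the statement is the Claim_ definition above) =====
theorem get_samples_spec : Claim_equal_get_samples := by
  intro lines _
  show get_samples lines = get_samples_alt lines
  rw [getA_char, getB_char]
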